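-- pv_equiv track=rewrite | github.com/caseSHY/AI-CLI | src/agentutils/cli.py | printf_conversions
-- ===== SOURCE A (Python) =====
-- from typing import Any, BinaryIO, Iterable, TextIO
--
-- class AgentError(Exception):
--     def __init__(
--         self,
--         code: str,
--         message: str,
--         *,
--         path: str | None = None,
--         suggestion: str | None = None,
--         details: dict[str, Any] | None = None,
--     ) -> None:
--         super().__init__(message)
--         self.code = code
--         self.message = message
--         self.path = path
--         self.suggestion = suggestion
--         self.details = details or {}
--
--     @property
--     def exit_code(self) -> int:
--         return EXIT.get(self.code, EXIT["general_error"])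
--
--     def to_dict(self) -> dict[str, Any]:
--         error: dict[str, Any] = {"code": self.code, "message": self.message}
--         if self.path is not None:
--             error["path"] = self.path
--         if self.suggestion is not None:
--             error["suggestion"] = self.suggestion
--         if self.details:
--             error["details"] = self.details
--         return error
--
-- def printf_conversions(format_string: str) -> list[str]:
--     conversions = []
--     index = 0
--     valid = "diouxXeEfFgGcrsa"
--     while index < len(format_string):
--         if format_string[index] != "%":
--             index += 1
--             continue
--         if index + 1 < len(format_string) and format_string[index + 1] == "%":
--             index += 2
--             continue
--         end = index + 1
--         while end < len(format_string) and format_string[end] not in valid: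
--             if format_string[end] == "*":
--                 raise AgentError("invalid_input", "printf '*' width and precision are not supported.")
--             end += 1
--         if end >= len(format_string):
--             raise AgentError("invalid_input", "printf format contains an incomplete conversion.")
--         conversions.append(format_string[end])
--         index = end + 1
--     return conversions
-- ===== SOURCE B (Python) =====
-- class AgentError(Exception):
--     def __init__(self, code, message, *, path=None, suggestion=None, details=None):
--         super().__init__(message)
--         self.code = code
--         self.message = message
--         self.path = path
--         self.suggestion = suggestion
--         self.details = details or {}
--
--
-- def printf_conversions(format_string: str) -> list[str]:
--     # single pass with a 3-state machine: 0 = normal text, 1 = just after '%', 2 = inside a conversion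
--     conversions = []
--     valid = "diouxXeEfFgGcrsa"
--     state = 0
--     for ch in format_string:
--         if state == 0:
--             if ch == "%":
--                 state = 1
--         elif state == 1 and ch == "%":
--             state = 0
--         elif ch == "*":
--             raise AgentError("invalid_input", "printf '*' width and precision are not supported.")
--         elif ch in valid:
--             conversions.append(ch)
--             state = 0
--         else:
--             state = 2
--     if state != 0:
--         raise AgentError("invalid_input", "printf format contains an incomplete conversion.")
--     return conversions
-- ===== Notes on version B (the rewrite author's own statement) =====
-- stated objective: simpler
-- what changed: Replaced A's index-jumping outer while with a nested inner scan-for-end while by a single flat for-pass over the characters driven by a 3-state machine (normal / just-after-% / inside-conversion).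
import Mathlib
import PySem

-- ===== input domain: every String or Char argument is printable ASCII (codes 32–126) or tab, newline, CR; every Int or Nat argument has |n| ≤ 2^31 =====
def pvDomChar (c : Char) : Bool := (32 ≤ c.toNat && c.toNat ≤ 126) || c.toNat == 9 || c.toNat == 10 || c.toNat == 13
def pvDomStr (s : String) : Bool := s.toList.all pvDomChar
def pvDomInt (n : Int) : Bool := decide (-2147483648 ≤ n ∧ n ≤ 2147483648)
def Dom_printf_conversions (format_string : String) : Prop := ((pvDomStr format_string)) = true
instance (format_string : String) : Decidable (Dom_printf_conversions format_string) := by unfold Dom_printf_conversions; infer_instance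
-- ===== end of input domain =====

-- B replaces A's index-jumping outer while + nested scan-for-end while by one flat
-- for-pass with a 3-state machine; same return value wherever A returns (Pre_).

def pvValid : List Char := "diouxXeEfFgGcrsa".toList

-- ===== PORT A =====
-- inner while of A: scan forward for the first char in `valid`;
-- none = Python raises there ('*' error or incomplete conversion); Pre_ excludes those inputs.
def pvScanA (rest : List Char) : Option (Char × List Char) :=
  match rest with
  | [] => none
  | c :: r =>
    if pvValid.contains c then some (c, r)
    else if c = '*' then none
    else pvScanA r

theorem pvScanA_length : ∀ (rest : List Char) (v : Char) (r : List Char),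
    pvScanA rest = some (v, r) → r.length < rest.length := by
  intro rest
  induction rest with
  | nil => intro v r h; simp [pvScanA] at h
  | cons c t ih =>
    intro v r h
    simp only [pvScanA] at h
    by_cases h1 : pvValid.contains c
    · rw [if_pos h1] at h; cases h; simp
    · rw [if_neg h1] at h
      by_cases h2 : c = '*'
      · rw [if_pos h2] at h; cases h
      · rw [if_neg h2] at h
        exact Nat.lt_trans (ih v r h) (by simp)

-- outer while of A over the remaining characters (the error paths return the
-- accumulator; Python raises there and Pre_ excludes those inputs)
def pvGoA (rest : List Char) (acc : List String) : List String :=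
  match rest with
  | [] => acc
  | c :: rest' =>
    if c ≠ '%' then pvGoA rest' acc                 -- not a conversion start: index += 1
    else if rest'.head? = some '%' then pvGoA rest'.tail acc   -- literal "%%": index += 2
    else
      match h3 : pvScanA rest' with                 -- inner while: find the specifier
      | some (v, r) => pvGoA r (acc ++ [String.ofList [v]])
      | none => acc
termination_by rest.length
decreasing_by
  all_goals simp_all [List.length_tail]
  all_goals (have := pvScanA_length _ _ _ h3; omega)

def printf_conversions (format_string : String) : List String :=
  pvGoA format_string.toList []

-- ===== PORT B =====
-- B's for-loop: state 0 = normal, 1 = just after '%', 2 = inside a conversion;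
-- the error paths (where Python B raises) return the accumulator, outside Pre_.
def pvGoB (rest : List Char) (state : Nat) (acc : List String) : List String :=
  match rest with
  | [] => acc
  | c :: r =>
    if state = 0 then
      pvGoB r (if c = '%' then 1 else 0) acc
    else if state = 1 ∧ c = '%' then
      pvGoB r 0 acc
    else if c = '*' then acc
    else if pvValid.contains c then
      pvGoB r 0 (acc ++ [String.ofList [c]])
    else pvGoB r 2 acc

def printf_conversions_alt (format_string : String) : List String :=
  pvGoB format_string.toList 0 []

-- ===== PRECONDITION & SPEC =====

theorem star_not_valid : ('*' : Char) ∉ pvValid := by decide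

theorem pct_not_valid : ('%' : Char) ∉ pvValid := by decide

-- Pre_: exactly the inputs on which Python A returns (it raises AgentError when a
-- conversion contains '*' or is left incomplete at the end of the string).  Stated as
-- a closed-form grammar on the character list: the string is a sequence of plain
-- characters, literal "%%" escapes, and complete conversions '%' ++ w ++ [v] whose
-- body w contains no specifier, no '*', and does not begin with the escape '%'.
inductive PvFormatOk : List Char → Prop where
  | nil : PvFormatOk []
  | plain {c : Char} {r : List Char} : c ≠ '%' → PvFormatOk r → PvFormatOk (c :: r)
  | lit {r : List Char} : PvFormatOk r → PvFormatOk ('%' :: '%' :: r)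
  | conv {w : List Char} {v : Char} {r : List Char} :
      w.head? ≠ some '%' → (∀ x ∈ w, x ∉ pvValid ∧ x ≠ '*') →
      v ∈ pvValid → PvFormatOk r → PvFormatOk ('%' :: (w ++ v :: r))

-- decision procedure for PvFormatOk (used only by the Decidable instance below)
def pvOk (cs : List Char) (state : Nat) : Bool :=
  match cs with
  | [] => state == 0
  | c :: r =>
    if state = 0 then pvOk r (if c = '%' then 1 else 0)
    else if state = 1 ∧ c = '%' then pvOk r 0
    else if c = '*' then false
    else if pvValid.contains c then pvOk r 0
    else pvOk r 2

theorem pvOk_state2_append {v : Char} {r : List Char} (hv : v ∈ pvValid) :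
    ∀ (w : List Char), (∀ x ∈ w, x ∉ pvValid ∧ x ≠ '*') →
      pvOk (w ++ v :: r) 2 = pvOk r 0 := by
  intro w
  induction w with
  | nil =>
    intro _
    have hs : ¬ v = '*' := fun he => star_not_valid (he ▸ hv)
    rw [List.nil_append, pvOk]
    simp [hs, hv]
  | cons x w' ih =>
    intro hw
    obtain ⟨hxv, hxs⟩ := hw x (by simp)
    have hxc : ¬ pvValid.contains x = true := fun hc => hxv (by simpa using hc)
    rw [List.cons_append, pvOk]
    simp only [if_neg (by omega : ¬ ((2:Nat) = 0)),
      if_neg (by simp : ¬ ((2:Nat) = 1 ∧ x = '%')), if_neg hxs, if_neg hxc]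
    exact ih (fun y hy => hw y (by simp [hy]))

theorem pvOk_of_formatOk : ∀ {cs : List Char}, PvFormatOk cs → pvOk cs 0 = true := by
  intro cs h
  induction h with
  | nil => rfl
  | plain hc _ ih => rw [pvOk]; simp [hc, ih]
  | lit _ ih => rw [pvOk, pvOk]; simp [ih]
  | @conv w v r hw hall hv _ ih =>
    have h1 : pvOk ('%' :: (w ++ v :: r)) 0 = pvOk (w ++ v :: r) 1 := by
      rw [pvOk]; simp
    rw [h1]
    match w, hw with
    | [], _ =>
      have hs : ¬ v = '*' := fun he => star_not_valid (he ▸ hv)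
      have hp : ¬ v = '%' := fun he => pct_not_valid (he ▸ hv)
      rw [List.nil_append, pvOk]
      simp [hs, hp, hv, ih]
    | x :: w', hw =>
      have hx : ¬ x = '%' := by simpa using hw
      obtain ⟨hxv, hxs⟩ := hall x (by simp)
      have hxc : ¬ pvValid.contains x = true := fun hc => hxv (by simpa using hc)
      rw [List.cons_append, pvOk]
      simp only [if_neg (by omega : ¬ ((1:Nat) = 0)),
        if_neg (by simp [hx] : ¬ (True ∧ x = '%')), if_neg hxs, if_neg hxc]
      rw [pvOk_state2_append hv w' (fun y hy => hall y (by simp [hy]))]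
      exact ih

theorem pvOk_state2_inv : ∀ (u : List Char), pvOk u 2 = true →
    ∃ w v r', u = w ++ v :: r' ∧ (∀ x ∈ w, x ∉ pvValid ∧ x ≠ '*') ∧
      v ∈ pvValid ∧ pvOk r' 0 = true := by
  intro u
  induction u with
  | nil => intro h; simp [pvOk] at h
  | cons x u' ih =>
    intro h
    rw [pvOk] at h
    rw [if_neg (by omega : ¬ ((2:Nat) = 0)),
      if_neg (by simp : ¬ ((2:Nat) = 1 ∧ x = '%'))] at h
    by_cases hxs : x = '*'
    · rw [if_pos hxs] at h; cases h
    · rw [if_neg hxs] at h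
      by_cases hxv : pvValid.contains x = true
      · rw [if_pos hxv] at h
        exact ⟨[], x, u', by simp, by simp, by simpa using hxv, h⟩
      · rw [if_neg hxv] at h
        obtain ⟨w, v, r', hu, hall, hv, hr⟩ := ih h
        exact ⟨x :: w, v, r', by simp [hu],
          fun y hy => by
            rcases List.mem_cons.mp hy with he | hy'
            · exact he ▸ ⟨by simpa using hxv, hxs⟩
            · exact hall y hy',
          hv, hr⟩

theorem formatOk_of_pvOk : ∀ (n : Nat) (cs : List Char), cs.length ≤ n →
    pvOk cs 0 = true → PvFormatOk cs := by
  intro n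
  induction n with
  | zero =>
    intro cs h _
    have : cs = [] := List.length_eq_zero_iff.mp (Nat.le_zero.mp h)
    exact this ▸ PvFormatOk.nil
  | succ n ih =>
    intro cs hlen h
    match cs with
    | [] => exact PvFormatOk.nil
    | c :: r =>
      simp only [List.length_cons, Nat.succ_le_succ_iff] at hlen
      rw [pvOk, if_pos rfl] at h
      by_cases hc : c = '%'
      · subst hc
        rw [if_pos rfl] at h
        match r, hlen, h with
        | [], _, h => cases h
        | d :: r', hlen, h =>
          simp only [List.length_cons] at hlen
          rw [pvOk] at h
          rw [if_neg (by omega : ¬ ((1:Nat) = 0))] at h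
          by_cases hd : d = '%'
          · rw [if_pos (by simp [hd])] at h
            exact hd ▸ PvFormatOk.lit (ih r' (by omega) h)
          · rw [if_neg (by simp [hd] : ¬ ((1:Nat) = 1 ∧ d = '%'))] at h
            by_cases hds : d = '*'
            · rw [if_pos hds] at h; cases h
            · rw [if_neg hds] at h
              by_cases hdv : pvValid.contains d = true
              · rw [if_pos hdv] at h
                exact PvFormatOk.conv (w := []) (by simp) (by simp)
                  (by simpa using hdv) (ih r' (by omega) h)
              · rw [if_neg hdv] at h
                obtain ⟨w, v, r'', hu, hall, hv, hr⟩ := pvOk_state2_inv r' h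
                have hl : r''.length ≤ n := by
                  have := congrArg List.length hu
                  simp at this; omega
                have := PvFormatOk.conv (w := d :: w) (by simp [hd])
                  (fun y hy => by
                    rcases List.mem_cons.mp hy with he | hy'
                    · exact he ▸ ⟨by simpa using hdv, hds⟩
                    · exact hall y hy')
                  hv (ih r'' hl hr)
                simpa [hu] using this
      · rw [if_neg hc] at h
        exact PvFormatOk.plain hc (ih r hlen h)

theorem pvOk_iff (cs : List Char) : pvOk cs 0 = true ↔ PvFormatOk cs :=
  ⟨formatOk_of_pvOk cs.length cs (le_refl _), pvOk_of_formatOk⟩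

def Pre_printf_conversions (format_string : String) : Prop :=
  PvFormatOk format_string.toList
instance (format_string : String) : Decidable (Pre_printf_conversions format_string) :=
  decidable_of_iff _ (pvOk_iff format_string.toList)

def pvWitness_printf_conversions : String := "a %d, %05.2f and %%x%s"

def Spec_printf_conversions (format_string : String) (out : List String) : Prop := out = printf_conversions_alt format_string
instance (format_string : String) (out : List String) : Decidable (Spec_printf_conversions format_string out) := by unfold Spec_printf_conversions; infer_instance

-- ===== CLAIM (what is proved, stated in full; the proofs are below) =====
def Claim_equal_printf_conversions : Prop := ∀ (format_string : String), Dom_printf_conversions format_string → Pre_printf_conversions format_string → Spec_printf_conversions format_string (printf_conversions format_string)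

-- ===== LEMMAS AND PROOFS =====

-- B in state 2 computes exactly what A's inner scan produces (error paths both yield acc)
theorem goB_state2 : ∀ (rest : List Char) (acc : List String),
    pvGoB rest 2 acc =
      match pvScanA rest with
      | some (v, r) => pvGoB r 0 (acc ++ [String.ofList [v]])
      | none => acc := by
  intro rest
  induction rest with
  | nil => intro acc; simp [pvGoB, pvScanA]
  | cons c r ih =>
    intro acc
    by_cases hv : c ∈ pvValid
    · have hs : ¬ c = '*' := fun he => star_not_valid (he ▸ hv)
      rw [pvGoB, pvScanA]
      simp [hv, hs]
    · by_cases hs : c = '*'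
      · rw [pvGoB, pvScanA]; simp [hs, star_not_valid]
      · rw [pvGoB, pvScanA]; simp [hv, hs, ih]

-- main loop correspondence (unconditional: both ports return acc on the error paths)
theorem goA_eq_goB : ∀ (n : Nat) (rest : List Char), rest.length ≤ n →
    ∀ (acc : List String), pvGoA rest acc = pvGoB rest 0 acc := by
  intro n
  induction n with
  | zero =>
    intro rest h acc
    have : rest = [] := List.length_eq_zero_iff.mp (Nat.le_zero.mp h)
    subst this
    rw [pvGoA, pvGoB]
  | succ n ih =>
    intro rest h acc
    match rest with
    | [] => rw [pvGoA, pvGoB]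
    | c :: rest' =>
      simp only [List.length_cons, Nat.succ_le_succ_iff] at h
      rw [pvGoA, pvGoB]
      by_cases hc : c = '%'
      · subst hc
        simp only [ne_eq, not_true_eq_false, if_false]
        match rest' with
        | [] => simp [pvScanA, pvGoB]
        | d :: rest'' =>
          have hn : rest''.length ≤ n := by simp at h; omega
          by_cases hd : d = '%'
          · subst hd
            simpa [pvGoB] using ih rest'' hn acc
          · simp only [List.head?_cons, List.tail_cons, Option.some.injEq,
              if_neg hd]
            rw [pvGoB]
            simp only [if_true]
            rw [if_neg (by omega : ¬ ((1:Nat) = 0)),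
              if_neg (by simp [hd] : ¬ (True ∧ d = '%'))]
            by_cases hs : d = '*'
            · have hv : ¬ pvValid.contains d = true := by
                subst hs; simp [star_not_valid]
              rw [if_pos hs]
              have hsc : pvScanA (d :: rest'') = none := by
                rw [pvScanA, if_neg hv, if_pos hs]
              rw [hsc]
            · rw [if_neg hs]
              by_cases hv : pvValid.contains d = true
              · rw [if_pos hv]
                have hsc : pvScanA (d :: rest'') = some (d, rest'') := by
                  rw [pvScanA, if_pos hv]
                rw [hsc]
                exact ih rest'' hn _
              · rw [if_neg hv]
                have hsc : pvScanA (d :: rest'') = pvScanA rest'' := by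
                  rw [pvScanA, if_neg hv, if_neg hs]
                rw [hsc, goB_state2]
                cases h3 : pvScanA rest'' with
                | none => rfl
                | some p =>
                  obtain ⟨v, r⟩ := p
                  have hlen := pvScanA_length _ _ _ h3
                  exact ih r (by omega) _
      · simp only [ne_eq, if_pos hc, if_neg hc, if_true]
        exact ih rest' h acc

-- ===== VERDICT (by name: the statement is the Claim_ definition above) =====
theorem printf_conversions_spec : Claim_equal_printf_conversions := by
  intro s _ _
  unfold Spec_printf_conversions printf_conversions printf_conversions_alt
  exact goA_eq_goB s.toList.length s.toList (le_refl _) []
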